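-- pv_equiv track=rewrite | github.com/andrabogildea/problems | problem1/problem_1.py | compose_highest_value
-- ===== SOURCE A (Python) =====
-- def compose_highest_value(counters):
--     result_list = []
--     for i in range(9, -1, -1):
--         result_list.append(str(i) * counters[i])
--     result = ''.join(result_list)
--     if result.startswith('0'):
--         result = '0'
--     return result
-- ===== SOURCE B (Python) =====
-- def compose_highest_value(counters):
--     if all(counters[d] <= 0 for d in range(1, 10)):
--         return '0' if counters[0] > 0 else ''
--
--     def build(d):
--         if d < 0:
--             return ''
--         return str(d) * counters[d] + build(d - 1)
--
--     return build(9)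
-- ===== Notes on version B (the rewrite author's own statement) =====
-- stated objective: alternative
-- what changed: Replaces A's 9-to-0 loop with list accumulation, join and a post-hoc startswith('0') collapse by an up-front closed-form guard (all counts for digits 1..9 nonpositive decides the '0'/'' collapse directly) followed by a recursive descent build(9) that concatenates the digit blocks without any intermediate list or string scan.
import Mathlib
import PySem

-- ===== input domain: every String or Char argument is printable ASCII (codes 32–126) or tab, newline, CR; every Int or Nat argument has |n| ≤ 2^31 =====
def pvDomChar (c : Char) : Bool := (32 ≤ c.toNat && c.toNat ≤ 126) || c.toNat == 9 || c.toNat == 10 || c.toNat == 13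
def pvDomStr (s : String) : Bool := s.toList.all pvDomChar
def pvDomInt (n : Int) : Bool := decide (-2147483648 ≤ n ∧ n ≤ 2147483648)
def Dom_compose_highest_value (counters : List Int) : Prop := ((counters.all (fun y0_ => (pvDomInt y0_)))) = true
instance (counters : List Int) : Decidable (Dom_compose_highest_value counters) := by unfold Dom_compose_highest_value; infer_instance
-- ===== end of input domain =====

-- B replaces A's loop+join+startswith('0')-collapse by a closed-form guard (all counts for digits 1..9 nonpositive)
-- followed by a recursive descent concatenating the digit blocks; same result, no speed claim.

-- ===== PORT A =====
def compose_highest_value (counters : List Int) : String :=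
  let result_list : List (List Char) :=
    (PySem.List.pyRange 9 (-1) (-1)).foldl
      (fun acc i => acc ++ [PySem.List.pyRepeat (PySem.Int.toChars i) (PySem.List.pyGetD counters i 0)]) []
  let result := PySem.Chars.join [] result_list
  if PySem.Chars.startswith result ['0'] then String.ofList ['0'] else String.ofList result

-- ===== PORT B =====
-- Python's inner 'def build(d)' recursing d, d-1, …, with base d < 0 → ''.
def chvBuild (counters : List Int) : Nat → List Char
  | 0 => PySem.List.pyRepeat (PySem.Int.toChars 0) (PySem.List.pyGetD counters 0 0)
  | d + 1 =>
      PySem.List.pyRepeat (PySem.Int.toChars ((d : Int) + 1)) (PySem.List.pyGetD counters ((d : Int) + 1) 0)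
        ++ chvBuild counters d

def compose_highest_value_alt (counters : List Int) : String :=
  if (PySem.List.pyRange 1 10 1).all (fun d => decide (PySem.List.pyGetD counters d 0 ≤ 0)) then
    (if 0 < PySem.List.pyGetD counters 0 0 then "0" else "")
  else
    String.ofList (chvBuild counters 9)

-- ===== PRECONDITION & SPEC =====
-- Both programs index counters[0]..counters[9]; with fewer than 10 entries Python raises IndexError, so those inputs are excluded.
def Pre_compose_highest_value (counters : List Int) : Prop := 10 ≤ counters.length
instance (counters : List Int) : Decidable (Pre_compose_highest_value counters) := by unfold Pre_compose_highest_value; infer_instance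
def pvWitness_compose_highest_value : List Int := [1,0,2,0,0,1,0,0,0,3]

def Spec_compose_highest_value (counters : List Int) (out : String) : Prop := out = compose_highest_value_alt counters
instance (counters : List Int) (out : String) : Decidable (Spec_compose_highest_value counters out) := by unfold Spec_compose_highest_value; infer_instance

-- ===== CLAIM (what is proved, stated in full; the proofs are below) =====
def Claim_equal_compose_highest_value : Prop := ∀ (counters : List Int), Dom_compose_highest_value counters → Pre_compose_highest_value counters → Spec_compose_highest_value counters (compose_highest_value counters)

-- ===== LEMMAS AND PROOFS =====

-- ''.join of a list of strings is concatenation.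
theorem join_nil_eq_flatten (l : List (List Char)) : PySem.Chars.join [] l = l.flatten := by
  have h : ∀ (m : List (List Char)), (List.intersperse ([] : List Char) m).flatten = m.flatten := by
    intro m
    induction m with
    | nil => rfl
    | cons x xs ih =>
      cases xs with
      | nil => rfl
      | cons y ys =>
        simp only [List.intersperse, List.flatten_cons] at *
        rw [ih]; simp
  simp [PySem.Chars.join, List.intercalate, h]

-- A's joined result is exactly B's recursive concatenation.
theorem a_result_eq_build (counters : List Int) :
    ((PySem.List.pyRange 9 (-1) (-1)).foldl
      (fun acc i => acc ++ [PySem.List.pyRepeat (PySem.Int.toChars i) (PySem.List.pyGetD counters i 0)])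
      ([] : List (List Char))).flatten = chvBuild counters 9 := by
  have hr : PySem.List.pyRange 9 (-1) (-1) = [9,8,7,6,5,4,3,2,1,0] := by decide
  simp only [hr, List.foldl, List.nil_append, List.flatten_append, List.flatten_cons,
    List.flatten_nil, List.append_nil, List.append_assoc]
  norm_num [chvBuild]

-- If every count for digits 1..d is nonpositive, the build reduces to digit 0's block.
theorem build_of_all_nonpos (counters : List Int) (d : Nat)
    (h : ∀ j : Nat, 1 ≤ j → j ≤ d → PySem.List.pyGetD counters (j : Int) 0 ≤ 0) :
    chvBuild counters d = PySem.List.pyRepeat (PySem.Int.toChars 0) (PySem.List.pyGetD counters 0 0) := by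
  induction d with
  | zero => rfl
  | succ d ih =>
    have hd : PySem.List.pyGetD counters ((d : Int) + 1) 0 ≤ 0 := by
      have := h (d + 1) (by omega) (by omega); simpa [Nat.cast_add] using this
    have hrep : PySem.List.pyRepeat (PySem.Int.toChars ((d : Int) + 1)) (PySem.List.pyGetD counters ((d : Int) + 1) 0) = [] := by
      simp [PySem.List.pyRepeat]; omega
    rw [chvBuild, hrep, List.nil_append]
    exact ih (fun j h1 h2 => h j h1 (by omega))

-- If some count for a digit in 1..d is positive (d ≤ 9), the build does not start with '0'.
theorem build_not_startswith_zero (counters : List Int) (d : Nat) (hd : d ≤ 9)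
    (h : ∃ j : Nat, 1 ≤ j ∧ j ≤ d ∧ 0 < PySem.List.pyGetD counters (j : Int) 0) :
    PySem.Chars.startswith (chvBuild counters d) ['0'] = false := by
  induction d with
  | zero => rcases h with ⟨j, h1, h2, _⟩; omega
  | succ d ih =>
    by_cases hc : 0 < PySem.List.pyGetD counters ((d : Int) + 1) 0
    · rw [chvBuild]
      set n := PySem.List.pyGetD counters ((d : Int) + 1) 0 with hn
      have hd8 : d ≤ 8 := by omega
      set c : Char := (PySem.Int.toChars ((d : Int) + 1)).headD 'x' with hcdef
      have hcs : PySem.Int.toChars ((d : Int) + 1) = [c] := by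
        rw [hcdef]; interval_cases d <;> decide
      have hc0 : c ≠ '0' := by
        rw [hcdef]; interval_cases d <;> decide
      rw [hcs, PySem.List.pyRepeat_singleton]
      have hpos : 0 < n.toNat := by omega
      cases hrep : List.replicate n.toNat c with
      | nil => simp [List.replicate_eq_nil_iff] at hrep; omega
      | cons x xs =>
        have hx : x = c := by
          have := List.mem_replicate.mp (hrep ▸ List.mem_cons_self (l := xs))
          exact this.2
        subst hx
        have hbe : ('0' == c) = false := beq_eq_false_iff_ne.mpr (Ne.symm hc0)
        show (('0' == c) && List.isPrefixOf ([] : List Char) (xs ++ chvBuild counters d)) = false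
        rw [hbe]
        rfl
    · have hrep : PySem.List.pyRepeat (PySem.Int.toChars ((d : Int) + 1)) (PySem.List.pyGetD counters ((d : Int) + 1) 0) = [] := by
        simp [PySem.List.pyRepeat]; omega
      rw [chvBuild, hrep, List.nil_append]
      refine ih (by omega) ?_
      rcases h with ⟨j, h1, h2, h3⟩
      refine ⟨j, h1, ?_, h3⟩
      rcases Nat.lt_or_ge j (d + 1) with hj | hj
      · omega
      · exfalso
        have hj' : j = d + 1 := by omega
        subst hj'
        push_cast at h3
        omega

-- replicate of '0' starts with '0' iff it is nonempty.
theorem startswith_replicate_zero (n : Nat) :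
    PySem.Chars.startswith (List.replicate n '0') ['0'] = decide (0 < n) := by
  cases n with
  | zero => simp [PySem.Chars.startswith]
  | succ k => simp [PySem.Chars.startswith, List.replicate_succ, List.isPrefixOf]

-- ===== VERDICT (by name: the statement is the Claim_ definition above) =====
theorem compose_highest_value_spec : Claim_equal_compose_highest_value := by
  intro counters _ _
  show compose_highest_value counters = compose_highest_value_alt counters
  rw [compose_highest_value, compose_highest_value_alt]
  simp only [join_nil_eq_flatten, a_result_eq_build]
  by_cases hg : (PySem.List.pyRange 1 10 1).all (fun d => decide (PySem.List.pyGetD counters d 0 ≤ 0)) = true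
  · have hall : ∀ j : Nat, 1 ≤ j → j ≤ 9 → PySem.List.pyGetD counters (j : Int) 0 ≤ 0 := by
      intro j h1 h2
      have hr : PySem.List.pyRange 1 10 1 = [1,2,3,4,5,6,7,8,9] := by decide
      rw [hr, List.all_eq_true] at hg
      interval_cases j <;> simpa using hg _ (by decide)
    rw [build_of_all_nonpos counters 9 hall, if_pos hg]
    have h0 : PySem.Int.toChars 0 = ['0'] := by decide
    rw [h0, PySem.List.pyRepeat_singleton, startswith_replicate_zero]
    by_cases hp : 0 < PySem.List.pyGetD counters 0 0
    · have hpos : 0 < (PySem.List.pyGetD counters 0 0).toNat := by omega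
      simp only [hpos, decide_true, if_true, if_pos hp]
    · have hz : (PySem.List.pyGetD counters 0 0).toNat = 0 := by omega
      simp only [hz, List.replicate_zero, if_neg hp]
      decide
  · have hex : ∃ j : Nat, 1 ≤ j ∧ j ≤ 9 ∧ 0 < PySem.List.pyGetD counters (j : Int) 0 := by
      have hr : PySem.List.pyRange 1 10 1 = [1,2,3,4,5,6,7,8,9] := by decide
      rw [hr] at hg
      simp only [List.all_eq_true, not_forall] at hg
      rcases hg with ⟨i, hi, hvi⟩
      have hvi' : 0 < PySem.List.pyGetD counters i 0 := by
        simpa using hvi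
      have hb : (1:Int) ≤ i ∧ i ≤ 9 := by fin_cases hi <;> norm_num
      refine ⟨i.toNat, by omega, by omega, ?_⟩
      have hcast : (i.toNat : Int) = i := by omega
      rw [hcast]; exact hvi'
    rw [build_not_startswith_zero counters 9 (by omega) hex, if_neg hg]
    simp
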